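-- pv_equiv track=rewrite | github.com/videscar/dogv-ai | api/reader.py | _select_diverse_chunks
-- ===== SOURCE A (Python) =====
-- def _score_text(text: str, keywords: list[str]) -> int:
--     if not text or not keywords:
--         return 0
--     lower = text.lower()
--     return sum(lower.count(k) for k in keywords)
--
-- def _matched_keywords(text: str, keywords: list[str]) -> set[str]:
--     if not text or not keywords:
--         return set()
--     lower = text.lower()
--     return {k for k in keywords if k in lower}
--
-- def _matched_phrases(text: str, phrases: list[str]) -> set[str]:
--     if not text or not phrases:
--         return set()
--     lower = text.lower()
--     return {phrase for phrase in phrases if phrase in lower}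
--
-- def _matched_entities(text: str, entities: list[str]) -> set[str]:
--     if not text or not entities:
--         return set()
--     lower = text.lower()
--     return {entity for entity in entities if entity in lower}
--
-- def _select_diverse_chunks(
--     chunks: list[str],
--     keywords: list[str],
--     phrases: list[str],
--     entities: list[str],
--     max_chunks: int,
--     already_covered: set[str] | None = None,
-- ) -> list[str]:
--     if not chunks or max_chunks <= 0:
--         return []
--     targets = set(keywords) | set(phrases) | set(entities)
--     if not targets:
--         return []
--     uncovered = set(targets)
--     if already_covered:
--         uncovered -= already_covered
--     if not uncovered:
--         return []
--     remaining = list(chunks)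
--     selected: list[str] = []
--
--     while remaining and len(selected) < max_chunks:
--         best_idx = None
--         best_score = (0, 0, 0, 0)
--         for idx, chunk in enumerate(remaining):
--             phrase_matches = _matched_phrases(chunk, phrases)
--             keyword_matches = _matched_keywords(chunk, keywords)
--             entity_matches = _matched_entities(chunk, entities)
--             if not phrase_matches and not keyword_matches and not entity_matches:
--                 continue
--             hits = phrase_matches | keyword_matches | entity_matches
--             new_hits = hits & uncovered if uncovered else hits
--             if not new_hits:
--                 continue
--             score = (
--                 len(new_hits),
--                 len(phrase_matches) + len(entity_matches),
--                 len(keyword_matches),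
--                 _score_text(chunk, list(keyword_matches)) + len(entity_matches),
--             )
--             if score > best_score:
--                 best_score = score
--                 best_idx = idx
--         if best_idx is None:
--             break
--         chosen = remaining.pop(best_idx)
--         selected.append(chosen)
--         uncovered -= _matched_phrases(chosen, phrases) | _matched_keywords(chosen, keywords)
--         if not uncovered:
--             break
--     return selected
-- ===== SOURCE B (Python) =====
-- def _select_diverse_chunks(
--     chunks,
--     keywords,
--     phrases,
--     entities,
--     max_chunks,
--     already_covered=None,
-- ):
--     if not chunks or max_chunks <= 0:
--         return []
--     targets = set(keywords) | set(phrases) | set(entities)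
--     if not targets:
--         return []
--     uncovered = set(targets)
--     if already_covered:
--         uncovered -= already_covered
--     if not uncovered:
--         return []
--     # Precompute, once per chunk, everything the greedy rounds need:
--     # the full hit set, the covering set (phrases+keywords), and the
--     # static score components that do not depend on the round.
--     items = []
--     for chunk in chunks:
--         lower = chunk.lower()
--         pm = {p for p in phrases if chunk and p in lower}
--         km = {k for k in keywords if chunk and k in lower}
--         em = {e for e in entities if chunk and e in lower}
--         static = (
--             len(pm) + len(em),
--             len(km),
--             sum(lower.count(k) for k in km) + len(em),
--         )
--         items.append((chunk, pm | km | em, pm | km, static))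
--     selected = []
--     while items and len(selected) < max_chunks:
--         best_idx = None
--         best = (0, 0, 0, 0)
--         for idx, (_, hits, _, static) in enumerate(items):
--             n = len(hits & uncovered)
--             if n == 0:
--                 continue
--             score = (n,) + static
--             if score > best:
--                 best = score
--                 best_idx = idx
--         if best_idx is None:
--             break
--         chunk, _, cover, _ = items.pop(best_idx)
--         selected.append(chunk)
--         uncovered -= cover
--         if not uncovered:
--             break
--     return selected
-- ===== Notes on version B (the rewrite author's own statement) =====
-- stated objective: faster
-- what changed: B precomputes, in one pass over chunks, each chunk's phrase/keyword/entity match sets and the round-independent score components, so every greedy round only intersects the stored hit set with the uncovered set instead of rescanning every chunk's text against every term.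
import Mathlib
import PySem

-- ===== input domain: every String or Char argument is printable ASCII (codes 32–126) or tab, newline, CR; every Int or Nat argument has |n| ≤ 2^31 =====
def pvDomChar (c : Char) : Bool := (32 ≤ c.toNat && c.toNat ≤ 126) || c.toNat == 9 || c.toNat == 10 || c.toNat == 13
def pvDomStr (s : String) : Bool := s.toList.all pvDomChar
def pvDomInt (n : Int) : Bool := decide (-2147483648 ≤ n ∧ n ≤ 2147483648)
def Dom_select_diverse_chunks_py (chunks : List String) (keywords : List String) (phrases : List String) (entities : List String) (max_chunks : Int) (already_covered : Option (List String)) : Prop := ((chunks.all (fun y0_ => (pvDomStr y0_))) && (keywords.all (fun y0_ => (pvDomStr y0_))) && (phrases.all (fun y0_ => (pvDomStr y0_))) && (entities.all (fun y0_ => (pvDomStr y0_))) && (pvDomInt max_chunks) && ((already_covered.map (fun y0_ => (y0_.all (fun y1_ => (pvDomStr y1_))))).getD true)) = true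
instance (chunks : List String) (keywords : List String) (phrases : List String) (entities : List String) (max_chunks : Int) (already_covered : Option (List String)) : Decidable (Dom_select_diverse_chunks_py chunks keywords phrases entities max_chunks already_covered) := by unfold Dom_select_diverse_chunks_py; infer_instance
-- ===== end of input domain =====

-- B precomputes each chunk's match sets and static score components once, so the greedy rounds only intersect with the uncovered set (asymptotically fewer substring scans); same return value proved.


-- shared helper: Python's '>' on 4-tuples of ints (lexicographic); used by both ports
def pvTupGt (a b : Int × Int × Int × Int) : Bool :=
  decide (a.1 > b.1 ∨ (a.1 = b.1 ∧ (a.2.1 > b.2.1 ∨ (a.2.1 = b.2.1 ∧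
    (a.2.2.1 > b.2.2.1 ∨ (a.2.2.1 = b.2.2.1 ∧ a.2.2.2 > b.2.2.2))))))

-- ===== PORT A =====
def score_text_py (text : String) (keywords : List String) : Int :=
  if text = "" || keywords.isEmpty then 0
  else ((keywords.map (fun k => (PySem.Str.count (PySem.Str.lower text) k : Int))).sum)

def matched_keywords_py (text : String) (keywords : List String) : PySem.Set String :=
  if text = "" || keywords.isEmpty then PySem.Set.empty
  else PySem.Set.ofList (keywords.filter (fun k => PySem.Str.isIn k (PySem.Str.lower text)))

def matched_phrases_py (text : String) (phrases : List String) : PySem.Set String :=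
  if text = "" || phrases.isEmpty then PySem.Set.empty
  else PySem.Set.ofList (phrases.filter (fun p => PySem.Str.isIn p (PySem.Str.lower text)))

def matched_entities_py (text : String) (entities : List String) : PySem.Set String :=
  if text = "" || entities.isEmpty then PySem.Set.empty
  else PySem.Set.ofList (entities.filter (fun e => PySem.Str.isIn e (PySem.Str.lower text)))

-- one round of A's inner 'for idx, chunk in enumerate(remaining)' scan
def pvStepA (keywords phrases entities : List String) (uncovered : PySem.Set String)
    (st : Option Int × (Int × Int × Int × Int)) (p : Int × String) :
    Option Int × (Int × Int × Int × Int) :=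
  let pm := matched_phrases_py p.2 phrases
  let km := matched_keywords_py p.2 keywords
  let em := matched_entities_py p.2 entities
  if pm.isEmpty && km.isEmpty && em.isEmpty then st
  else
    let hits := PySem.Set.union (PySem.Set.union pm km) em
    let new_hits := if !uncovered.isEmpty then PySem.Set.inter hits uncovered else hits
    if new_hits.isEmpty then st
    else
      let score := (PySem.Set.len new_hits, PySem.Set.len pm + PySem.Set.len em,
                    PySem.Set.len km, score_text_py p.2 km + PySem.Set.len em)
      if pvTupGt score st.2 then (some p.1, score) else st

def pvScanA (keywords phrases entities : List String) (uncovered : PySem.Set String)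
    (remaining : List String) : Option Int × (Int × Int × Int × Int) :=
  (PySem.List.enumerate remaining).foldl (pvStepA keywords phrases entities uncovered)
    (none, (0, 0, 0, 0))

-- A's while loop (fuel = length of remaining; the loop removes one chunk per pass)
def pvLoopA (keywords phrases entities : List String) (max_chunks : Int) :
    Nat → List String → PySem.Set String → List String → List String
  | 0, _, _, selected => selected
  | fuel + 1, remaining, uncovered, selected =>
    if remaining.isEmpty || !decide ((selected.length : Int) < max_chunks) then selected
    else
      match (pvScanA keywords phrases entities uncovered remaining).1 with
      | none => selected
      | some idx =>
        match PySem.List.pop? remaining idx with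
        | none => selected   -- unreachable (idx is an enumerate index); totalisation only
        | some (chosen, rest) =>
          let selected' := selected ++ [chosen]
          let uncovered' := PySem.Set.diff uncovered
            (PySem.Set.union (matched_phrases_py chosen phrases) (matched_keywords_py chosen keywords))
          if uncovered'.isEmpty then selected'
          else pvLoopA keywords phrases entities max_chunks fuel rest uncovered' selected'

def select_diverse_chunks_py (chunks : List String) (keywords : List String) (phrases : List String) (entities : List String) (max_chunks : Int) (already_covered : Option (List String)) : List String :=
  if chunks.isEmpty || max_chunks ≤ 0 then []
  else
    let targets := PySem.Set.union (PySem.Set.union (PySem.Set.ofList keywords) (PySem.Set.ofList phrases)) (PySem.Set.ofList entities)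
    if targets.isEmpty then []
    else
      let uncovered0 := targets
      let uncovered1 := match already_covered with
        | some ac => if ac.isEmpty then uncovered0 else PySem.Set.diff uncovered0 ac
        | none => uncovered0
      if uncovered1.isEmpty then []
      else pvLoopA keywords phrases entities max_chunks chunks.length chunks uncovered1 []

-- ===== PORT B =====
-- per-chunk precomputed record: (chunk, hits, cover = phrases|keywords, static score triple)
def pvEnrich (keywords phrases entities : List String) (chunk : String) :
    String × PySem.Set String × PySem.Set String × (Int × Int × Int) :=
  let lower := PySem.Str.lower chunk
  let pm := PySem.Set.ofList (phrases.filter (fun p => chunk ≠ "" && PySem.Str.isIn p lower))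
  let km := PySem.Set.ofList (keywords.filter (fun k => chunk ≠ "" && PySem.Str.isIn k lower))
  let em := PySem.Set.ofList (entities.filter (fun e => chunk ≠ "" && PySem.Str.isIn e lower))
  (chunk, PySem.Set.union (PySem.Set.union pm km) em, PySem.Set.union pm km,
   (PySem.Set.len pm + PySem.Set.len em, PySem.Set.len km,
    ((km.map (fun k => (PySem.Str.count lower k : Int))).sum) + PySem.Set.len em))

def pvStepB (uncovered : PySem.Set String)
    (st : Option Int × (Int × Int × Int × Int))
    (p : Int × (String × PySem.Set String × PySem.Set String × (Int × Int × Int))) :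
    Option Int × (Int × Int × Int × Int) :=
  let n := PySem.Set.len (PySem.Set.inter p.2.2.1 uncovered)
  if n = 0 then st
  else
    let score := (n, p.2.2.2.2.1, p.2.2.2.2.2.1, p.2.2.2.2.2.2)
    if pvTupGt score st.2 then (some p.1, score) else st

def pvScanB (uncovered : PySem.Set String)
    (items : List (String × PySem.Set String × PySem.Set String × (Int × Int × Int))) :
    Option Int × (Int × Int × Int × Int) :=
  (PySem.List.enumerate items).foldl (pvStepB uncovered) (none, (0, 0, 0, 0))

def pvLoopB (max_chunks : Int) :
    Nat → List (String × PySem.Set String × PySem.Set String × (Int × Int × Int)) →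
    PySem.Set String → List String → List String
  | 0, _, _, selected => selected
  | fuel + 1, items, uncovered, selected =>
    if items.isEmpty || !decide ((selected.length : Int) < max_chunks) then selected
    else
      match (pvScanB uncovered items).1 with
      | none => selected
      | some idx =>
        match PySem.List.pop? items idx with
        | none => selected   -- unreachable; totalisation only
        | some (it, rest) =>
          let selected' := selected ++ [it.1]
          let uncovered' := PySem.Set.diff uncovered it.2.2.1
          if uncovered'.isEmpty then selected'
          else pvLoopB max_chunks fuel rest uncovered' selected'

def select_diverse_chunks_py_alt (chunks : List String) (keywords : List String) (phrases : List String) (entities : List String) (max_chunks : Int) (already_covered : Option (List String)) : List String :=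
  if chunks.isEmpty || max_chunks ≤ 0 then []
  else
    let targets := PySem.Set.union (PySem.Set.union (PySem.Set.ofList keywords) (PySem.Set.ofList phrases)) (PySem.Set.ofList entities)
    if targets.isEmpty then []
    else
      let uncovered0 := targets
      let uncovered1 := match already_covered with
        | some ac => if ac.isEmpty then uncovered0 else PySem.Set.diff uncovered0 ac
        | none => uncovered0
      if uncovered1.isEmpty then []
      else
        let items := chunks.map (pvEnrich keywords phrases entities)
        pvLoopB max_chunks items.length items uncovered1 []


-- ===== PRECONDITION & SPEC =====
def Spec_select_diverse_chunks_py (chunks : List String) (keywords : List String) (phrases : List String) (entities : List String) (max_chunks : Int) (already_covered : Option (List String)) (out : List String) : Prop := out = select_diverse_chunks_py_alt chunks keywords phrases entities max_chunks already_covered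
instance (chunks : List String) (keywords : List String) (phrases : List String) (entities : List String) (max_chunks : Int) (already_covered : Option (List String)) (out : List String) : Decidable (Spec_select_diverse_chunks_py chunks keywords phrases entities max_chunks already_covered out) := by unfold Spec_select_diverse_chunks_py; infer_instance

-- ===== CLAIM (what is proved, stated in full; the proofs are below) =====
def Claim_equal_select_diverse_chunks_py : Prop := ∀ (chunks : List String) (keywords : List String) (phrases : List String) (entities : List String) (max_chunks : Int) (already_covered : Option (List String)), Dom_select_diverse_chunks_py chunks keywords phrases entities max_chunks already_covered → Spec_select_diverse_chunks_py chunks keywords phrases entities max_chunks already_covered (select_diverse_chunks_py chunks keywords phrases entities max_chunks already_covered)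

-- ===== LEMMAS AND PROOFS =====
theorem matched_eq (text : String) (terms : List String) :
    matched_keywords_py text terms
      = PySem.Set.ofList (terms.filter (fun t => text ≠ "" && PySem.Str.isIn t (PySem.Str.lower text))) := by
  by_cases h : text = ""
  · simp [matched_keywords_py, h, PySem.Set.empty, PySem.Set.ofList]
  · by_cases ht : terms = []
    · simp [matched_keywords_py, ht, h, PySem.Set.empty, PySem.Set.ofList]
    · simp [matched_keywords_py, h, ht, List.isEmpty_iff]

theorem score_text_matched (text : String) (kws : List String) :
    score_text_py text (matched_keywords_py text kws)
      = ((matched_keywords_py text kws).map (fun k => (PySem.Str.count (PySem.Str.lower text) k : Int))).sum := by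
  by_cases h : text = ""
  · simp [matched_keywords_py, h, score_text_py, PySem.Set.empty]
  · by_cases hm : matched_keywords_py text kws = []
    · simp [score_text_py, hm]
    · simp [score_text_py, h, List.isEmpty_iff, hm]

theorem step_eq (keywords phrases entities : List String) (uncovered : PySem.Set String)
    (hu : uncovered.isEmpty = false) (st : Option Int × (Int × Int × Int × Int))
    (i : Int) (chunk : String) :
    pvStepB uncovered st (i, pvEnrich keywords phrases entities chunk)
      = pvStepA keywords phrases entities uncovered st (i, chunk) := by
  have hpm : PySem.Set.ofList (phrases.filter (fun p => chunk ≠ "" && PySem.Str.isIn p (PySem.Str.lower chunk)))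
      = matched_phrases_py chunk phrases := (matched_eq chunk phrases).symm
  have hkm : PySem.Set.ofList (keywords.filter (fun k => chunk ≠ "" && PySem.Str.isIn k (PySem.Str.lower chunk)))
      = matched_keywords_py chunk keywords := (matched_eq chunk keywords).symm
  have hem : PySem.Set.ofList (entities.filter (fun e => chunk ≠ "" && PySem.Str.isIn e (PySem.Str.lower chunk)))
      = matched_entities_py chunk entities := (matched_eq chunk entities).symm
  simp only [pvStepB, pvEnrich, pvStepA, hpm, hkm, hem]
  set pm := matched_phrases_py chunk phrases with hpm'
  set km := matched_keywords_py chunk keywords with hkm'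
  set em := matched_entities_py chunk entities with hem'
  set hits := PySem.Set.union (PySem.Set.union pm km) em with hhits
  simp only [hu, Bool.not_false, if_true]
  by_cases hn : PySem.Set.inter hits uncovered = []
  · -- n = 0; A skips in either branch
    simp [hn, PySem.Set.len]
  · have hne : PySem.Set.len (PySem.Set.inter hits uncovered) ≠ 0 := by
      simpa [PySem.Set.len, List.length_eq_zero_iff] using hn
    have hall : ¬ (pm.isEmpty && km.isEmpty && em.isEmpty) = true := by
      intro hAll
      simp only [Bool.and_eq_true, List.isEmpty_iff] at hAll
      apply hn
      have : hits = [] := by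
        rw [hhits, hAll.1.1, hAll.1.2, hAll.2]
        rfl
      rw [this]; rfl
    simp only [if_neg hne, if_neg hall]
    have hnewne : (PySem.Set.inter hits uncovered).isEmpty = false := by
      simp [hn]
    simp only [hnewne, Bool.false_eq_true, if_false]
    have hst : score_text_py chunk km + PySem.Set.len em
        = (km.map (fun k => (PySem.Str.count (PySem.Str.lower chunk) k : Int))).sum + PySem.Set.len em := by
      rw [hkm', score_text_matched]
    rw [hst]

theorem enumerate_map {α β : Type} (f : α → β) (xs : List α) (s : Int) :
    PySem.List.enumerate (xs.map f) s = (PySem.List.enumerate xs s).map (fun q => (q.1, f q.2)) := by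
  induction xs generalizing s with
  | nil => simp [PySem.List.enumerate_nil]
  | cons x xs ih => simp [PySem.List.enumerate_cons, ih]

theorem pop?_map {α β : Type} (f : α → β) (xs : List α) (i : Int) :
    PySem.List.pop? (xs.map f) i
      = Option.map (fun r => (f r.1, r.2.map f)) (PySem.List.pop? xs i) := by
  simp only [PySem.List.pop?, List.length_map]
  cases PySem.List.pyIdx? xs.length i with
  | none => simp
  | some k => simp [List.getElem?_map, List.eraseIdx_map]; cases xs[k]? <;> simp

theorem scan_eq (keywords phrases entities : List String) (uncovered : PySem.Set String)
    (hu : uncovered.isEmpty = false) (remaining : List String) :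
    pvScanB uncovered (remaining.map (pvEnrich keywords phrases entities))
      = pvScanA keywords phrases entities uncovered remaining := by
  simp only [pvScanB, pvScanA, enumerate_map, List.foldl_map]
  congr 1
  funext st q
  exact step_eq keywords phrases entities uncovered hu st q.1 q.2

theorem loop_eq (keywords phrases entities : List String) (max_chunks : Int)
    (fuel : Nat) (remaining : List String) (uncovered : PySem.Set String)
    (selected : List String) (hu : uncovered.isEmpty = false) :
    pvLoopB max_chunks fuel (remaining.map (pvEnrich keywords phrases entities)) uncovered selected
      = pvLoopA keywords phrases entities max_chunks fuel remaining uncovered selected := by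
  induction fuel generalizing remaining uncovered selected with
  | zero => rfl
  | succ fuel ih =>
    simp only [pvLoopB, pvLoopA, List.isEmpty_map]
    by_cases hg : (remaining.isEmpty || !decide ((selected.length : Int) < max_chunks)) = true
    · simp [hg]
    · simp only [hg, Bool.false_eq_true, if_false]
      rw [scan_eq keywords phrases entities uncovered hu remaining]
      cases hidx : (pvScanA keywords phrases entities uncovered remaining).1 with
      | none => rfl
      | some idx =>
        dsimp only
        rw [pop?_map]
        cases hpop : PySem.List.pop? remaining idx with
        | none => rfl
        | some r =>
          obtain ⟨chosen, rest⟩ := r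
          simp only [Option.map_some]
          have hcov : (pvEnrich keywords phrases entities chosen).2.2.1
              = PySem.Set.union (matched_phrases_py chosen phrases) (matched_keywords_py chosen keywords) := by
            simp only [pvEnrich]
            rw [← matched_eq chosen phrases, ← matched_eq chosen keywords]
            rfl
          simp only [pvEnrich] at hcov ⊢
          rw [hcov]
          by_cases he : (PySem.Set.diff uncovered
              (PySem.Set.union (matched_phrases_py chosen phrases) (matched_keywords_py chosen keywords))).isEmpty = true
          · simp [he]
          · simp only [he, Bool.false_eq_true, if_false]
            exact ih rest _ _ (by simpa using he)

theorem main_eq (chunks keywords phrases entities : List String) (max_chunks : Int)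
    (already_covered : Option (List String)) :
    select_diverse_chunks_py chunks keywords phrases entities max_chunks already_covered
      = select_diverse_chunks_py_alt chunks keywords phrases entities max_chunks already_covered := by
  simp only [select_diverse_chunks_py, select_diverse_chunks_py_alt]
  by_cases h1 : (chunks.isEmpty || decide (max_chunks ≤ 0)) = true
  · simp [h1]
  · simp only [h1, Bool.false_eq_true, if_false]
    by_cases h2 : (PySem.Set.union (PySem.Set.union (PySem.Set.ofList keywords) (PySem.Set.ofList phrases)) (PySem.Set.ofList entities)).isEmpty = true
    · simp [h2]
    · simp only [h2, Bool.false_eq_true, if_false]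
      set u := (match already_covered with
        | some ac => if ac.isEmpty then PySem.Set.union (PySem.Set.union (PySem.Set.ofList keywords) (PySem.Set.ofList phrases)) (PySem.Set.ofList entities)
            else PySem.Set.diff (PySem.Set.union (PySem.Set.union (PySem.Set.ofList keywords) (PySem.Set.ofList phrases)) (PySem.Set.ofList entities)) ac
        | none => PySem.Set.union (PySem.Set.union (PySem.Set.ofList keywords) (PySem.Set.ofList phrases)) (PySem.Set.ofList entities)) with hudef
      by_cases h3 : u.isEmpty = true
      · simp [h3]
      · simp only [h3, Bool.false_eq_true, if_false, List.length_map]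
        exact (loop_eq keywords phrases entities max_chunks chunks.length chunks u []
          (by simpa using h3)).symm

-- ===== VERDICT (by name: the statement is the Claim_ definition above) =====
theorem select_diverse_chunks_py_spec : Claim_equal_select_diverse_chunks_py := by
  intro chunks keywords phrases entities max_chunks already_covered _
  unfold Spec_select_diverse_chunks_py
  exact main_eq chunks keywords phrases entities max_chunks already_covered
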